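-- pv_equiv track=rewrite | github.com/gabriel-bri/ccufcqx | 3º semestre/Probabilidade e estatística/Trabalho Final/200 questões em Python/Morgado/Capítulo 3/Seção 3.1/q1.py | divisores
-- ===== SOURCE A (Python) =====
-- def divisores(inicio, fim, divisores_list):
--   contagem = {
--       "pelo_menos_tres": 0,
--       "nenhum": 0,
--       "exatamente_um": 0,
--       "pelo_menos_um": 0
--   }
--
--   for num in range(inicio, fim + 1):
--       divisores_do_num = [divisor for divisor in divisores_list if num % divisor == 0]
--       if len(divisores_do_num) >= 3:
--           contagem["pelo_menos_tres"] += 1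
--       elif len(divisores_do_num) == 0:
--           contagem["nenhum"] += 1
--       elif len(divisores_do_num) == 1:
--           contagem["exatamente_um"] += 1
--       else:
--           contagem["pelo_menos_um"] += 1
--
--   return contagem
-- ===== SOURCE B (Python) =====
-- def divisores(inicio, fim, divisores_list):
--     nums = list(range(inicio, fim + 1))
--     counts = [0] * len(nums)
--     for d in divisores_list:
--         counts = [c + (1 if num % d == 0 else 0) for c, num in zip(counts, nums)]
--     contagem = {
--         "pelo_menos_tres": 0,
--         "nenhum": 0,
--         "exatamente_um": 0,
--         "pelo_menos_um": 0
--     }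
--     for c in counts:
--         if c >= 3:
--             contagem["pelo_menos_tres"] += 1
--         elif c == 0:
--             contagem["nenhum"] += 1
--         elif c == 1:
--             contagem["exatamente_um"] += 1
--         else:
--             contagem["pelo_menos_um"] += 1
--     return contagem
-- ===== Notes on version B (the rewrite author's own statement) =====
-- stated objective: alternative
-- what changed: B swaps the loop nesting: it materialises a per-number hit-count table by iterating divisor-major over the range, then classifies the counts in a separate second pass, instead of A's number-major loop that rebuilds the divisor list for each number.
import Mathlib
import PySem

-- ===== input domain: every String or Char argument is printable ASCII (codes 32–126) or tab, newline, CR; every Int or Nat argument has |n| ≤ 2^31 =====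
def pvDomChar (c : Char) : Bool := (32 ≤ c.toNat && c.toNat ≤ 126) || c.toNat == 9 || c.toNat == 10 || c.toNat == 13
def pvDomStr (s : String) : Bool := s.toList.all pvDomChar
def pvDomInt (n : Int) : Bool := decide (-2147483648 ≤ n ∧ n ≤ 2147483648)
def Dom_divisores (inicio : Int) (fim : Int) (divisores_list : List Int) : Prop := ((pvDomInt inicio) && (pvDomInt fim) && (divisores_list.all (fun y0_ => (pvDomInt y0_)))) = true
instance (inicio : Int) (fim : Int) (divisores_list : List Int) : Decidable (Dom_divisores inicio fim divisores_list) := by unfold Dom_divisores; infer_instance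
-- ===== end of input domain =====

-- ===== PORT A =====
-- B rebuilds the result from a divisor-major count table; equal to A on inputs where A does not raise (0 ∉ divisores_list unless the range is empty).
def divisores (inicio : Int) (fim : Int) (divisores_list : List Int) : List (String × Int) :=
  ((PySem.List.pyRange inicio (fim + 1) 1).foldl (fun ct num =>
      if (divisores_list.filter (fun divisor => PySem.Int.mod num divisor == 0)).length ≥ 3 then
        ct.modify "pelo_menos_tres" 0 (· + 1)
      else if (divisores_list.filter (fun divisor => PySem.Int.mod num divisor == 0)).length = 0 then
        ct.modify "nenhum" 0 (· + 1)
      else if (divisores_list.filter (fun divisor => PySem.Int.mod num divisor == 0)).length = 1 then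
        ct.modify "exatamente_um" 0 (· + 1)
      else ct.modify "pelo_menos_um" 0 (· + 1))
    (PySem.Dict.ofList [("pelo_menos_tres", 0), ("nenhum", 0), ("exatamente_um", 0), ("pelo_menos_um", 0)])).items

-- ===== PORT B =====
def divisores_alt (inicio : Int) (fim : Int) (divisores_list : List Int) : List (String × Int) :=
  ((divisores_list.foldl (fun cs d =>
      List.zipWith (fun c num => c + (if PySem.Int.mod num d == 0 then 1 else 0)) cs
        (PySem.List.pyRange inicio (fim + 1) 1))
      ((PySem.List.pyRange inicio (fim + 1) 1).map (fun _ => (0 : Int)))).foldl (fun ct c =>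
      if c ≥ 3 then ct.modify "pelo_menos_tres" 0 (· + 1)
      else if c = 0 then ct.modify "nenhum" 0 (· + 1)
      else if c = 1 then ct.modify "exatamente_um" 0 (· + 1)
      else ct.modify "pelo_menos_um" 0 (· + 1))
    (PySem.Dict.ofList [("pelo_menos_tres", 0), ("nenhum", 0), ("exatamente_um", 0), ("pelo_menos_um", 0)])).items

-- ===== PRECONDITION & SPEC =====
-- Pre_ excludes exactly the inputs where A raises ZeroDivisionError: a zero divisor with a nonempty range.
def Pre_divisores (inicio : Int) (fim : Int) (divisores_list : List Int) : Prop :=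
  fim < inicio ∨ 0 ∉ divisores_list
instance (inicio : Int) (fim : Int) (divisores_list : List Int) : Decidable (Pre_divisores inicio fim divisores_list) := by unfold Pre_divisores; infer_instance
def pvWitness_divisores : Int × Int × List Int := (1, 10, [2, 3, 5])
def Spec_divisores (inicio : Int) (fim : Int) (divisores_list : List Int) (out : List (String × Int)) : Prop := out = divisores_alt inicio fim divisores_list
instance (inicio : Int) (fim : Int) (divisores_list : List Int) (out : List (String × Int)) : Decidable (Spec_divisores inicio fim divisores_list out) := by unfold Spec_divisores; infer_instance

-- ===== CLAIM (what is proved, stated in full; the proofs are below) =====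
def Claim_equal_divisores : Prop := ∀ (inicio : Int) (fim : Int) (divisores_list : List Int), Dom_divisores inicio fim divisores_list → Pre_divisores inicio fim divisores_list → Spec_divisores inicio fim divisores_list (divisores inicio fim divisores_list)

-- ===== LEMMAS AND PROOFS =====

-- zipWith of a function against a mapped copy of the same list is a map.
theorem zipWith_map_left_self {α β : Type} (g : β → α → β) (f : α → β) :
    ∀ (l : List α), List.zipWith g (l.map f) l = l.map (fun x => g (f x) x) := by
  intro l
  induction l with
  | nil => rfl
  | cons x xs ih => simp [ih]

-- The divisor-major table equals the per-number divisor counts.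
theorem counts_eq_map (nums : List Int) :
    ∀ (ds : List Int) (f : Int → Int),
      ds.foldl (fun cs d =>
          List.zipWith (fun c num => c + (if PySem.Int.mod num d == 0 then 1 else 0)) cs nums)
        (nums.map f)
      = nums.map (fun num =>
          f num + ((ds.filter (fun d => PySem.Int.mod num d == 0)).length : Int)) := by
  intro ds
  induction ds with
  | nil => intro f; simp
  | cons d ds ih =>
      intro f
      simp only [List.foldl_cons]
      rw [zipWith_map_left_self (fun c num => c + (if PySem.Int.mod num d == 0 then 1 else 0)) f nums]
      rw [ih (fun x => f x + (if PySem.Int.mod x d == 0 then 1 else 0))]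
      apply List.map_congr_left
      intro num _
      by_cases h : PySem.Int.mod num d == 0 <;> simp [List.filter, h] <;> omega

-- ===== VERDICT (by name: the statement is the Claim_ definition above) =====
theorem divisores_spec : Claim_equal_divisores := by
  intro inicio fim divisores_list _ _
  unfold Spec_divisores divisores divisores_alt
  rw [counts_eq_map (PySem.List.pyRange inicio (fim + 1) 1) divisores_list (fun _ => (0 : Int))]
  rw [List.foldl_map]
  congr 1
  apply List.foldl_ext
  intro ct num _
  simp only [Int.zero_add]
  set k := (divisores_list.filter (fun d => PySem.Int.mod num d == 0)).length with hk
  by_cases h3 : k ≥ 3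
  · have : (3 : Int) ≤ (k : Int) := by omega
    simp [h3, this]
  · have c3 : ¬ ((3 : Int) ≤ (k : Int)) := by omega
    by_cases h0 : k = 0
    · simp [h3, h0, c3]
    · have c0 : ¬ ((k : Int) = 0) := by omega
      by_cases h1 : k = 1
      · simp [h3, h0, h1, c3, c0]
      · have c1 : ¬ ((k : Int) = 1) := by omega
        simp [h3, h0, h1, c3, c0, c1]
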